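-- pv_equiv track=rewrite | github.com/mdmansooralam21/python-foundation | learn_python.py | check_amicable_numbers
-- ===== SOURCE A (Python) =====
-- def check_amicable_numbers(num1, num2):
--     sum1=0
--     sum2=0
--
--     if num1>0 and num2>0:
--         for div1 in range (1, num1):
--             if num1%div1==0:
--                 sum1+=div1
--
--         for div2 in range (1, num2):
--             if num2%div2==0:
--                 sum2+=div2
--
--         if (sum1==num2) and (sum2==num1):
--             return True
--
--         else:
--             return False
-- ===== SOURCE B (Python) =====
-- def _proper_divisor_sum(n):
--     # sum of proper divisors via sqrt factor pairing: each divisor d <= sqrt(n)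
--     # contributes d and its cofactor n//d (counted once when they coincide).
--     if n == 1:
--         return 0
--     s = 1
--     d = 2
--     while d * d <= n:
--         if n % d == 0:
--             q = n // d
--             s += d
--             if q != d:
--                 s += q
--         d += 1
--     return s
--
-- def check_amicable_numbers(num1, num2):
--     if num1 <= 0 or num2 <= 0:
--         return None
--     return _proper_divisor_sum(num1) == num2 and _proper_divisor_sum(num2) == num1
-- ===== Notes on version B (the rewrite author's own statement) =====
-- stated objective: faster
-- what changed: A sums proper divisors by trying every candidate in range(1, n); B sums them by the sqrt factor-pairing loop (each divisor d with d*d <= n contributes d and its cofactor n//d), so each check costs O(sqrt n) instead of O(n).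
import Mathlib
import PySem

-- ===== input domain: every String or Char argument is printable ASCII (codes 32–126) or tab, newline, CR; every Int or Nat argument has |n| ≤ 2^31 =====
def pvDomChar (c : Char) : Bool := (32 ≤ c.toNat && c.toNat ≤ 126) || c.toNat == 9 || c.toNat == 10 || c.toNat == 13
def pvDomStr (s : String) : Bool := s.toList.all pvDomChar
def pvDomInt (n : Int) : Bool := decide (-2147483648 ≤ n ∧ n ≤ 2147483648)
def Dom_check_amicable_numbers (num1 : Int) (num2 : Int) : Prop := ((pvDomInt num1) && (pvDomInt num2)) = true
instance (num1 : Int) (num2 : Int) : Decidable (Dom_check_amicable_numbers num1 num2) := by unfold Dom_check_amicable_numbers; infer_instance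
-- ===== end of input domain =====

-- B replaces A's full-range O(n) proper-divisor scans with O(√n) factor pairing; return value unchanged.

-- ===== PORT A =====
-- A's loop 'for div in range(1, n): if n % div == 0: sum += div'
def pvSumA (n : Int) : Int :=
  (PySem.List.pyRange 1 n 1).foldl (fun s d => if PySem.Int.mod n d = 0 then s + d else s) 0

def check_amicable_numbers (num1 : Int) (num2 : Int) : Option Bool :=
  if num1 > 0 ∧ num2 > 0 then
    let sum1 := pvSumA num1
    let sum2 := pvSumA num2
    some (decide (sum1 = num2 ∧ sum2 = num1))
  else
    none  -- Python falls off the function: implicit None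

-- ===== PORT B =====
-- Source B's 'while d*d <= n' loop, as structural recursion on d (argument n is positive here)
def pvLoopB (n : Nat) (d : Nat) : Nat :=
  if _hdd : d * d ≤ n then
    (if n % d = 0 then d + (if n / d ≠ d then n / d else 0) else 0) + pvLoopB n (d + 1)
  else 0
termination_by n + 1 - d
decreasing_by
  have hd : d ≤ d * d := by
    cases d with
    | zero => simp
    | succ m => exact Nat.le_mul_of_pos_left _ (Nat.succ_pos m)
  omega

def pvSumB (n : Nat) : Nat :=
  if n = 1 then 0 else 1 + pvLoopB n 2

def check_amicable_numbers_alt (num1 : Int) (num2 : Int) : Option Bool :=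
  if num1 ≤ 0 ∨ num2 ≤ 0 then none
  else some (decide ((pvSumB num1.toNat : Int) = num2 ∧ (pvSumB num2.toNat : Int) = num1))

-- ===== PRECONDITION & SPEC =====
def Spec_check_amicable_numbers (num1 : Int) (num2 : Int) (out : Option Bool) : Prop := out = check_amicable_numbers_alt num1 num2
instance (num1 : Int) (num2 : Int) (out : Option Bool) : Decidable (Spec_check_amicable_numbers num1 num2 out) := by unfold Spec_check_amicable_numbers; infer_instance

-- ===== CLAIM (what is proved, stated in full; the proofs are below) =====
def Claim_equal_check_amicable_numbers : Prop := ∀ (num1 : Int) (num2 : Int), Dom_check_amicable_numbers num1 num2 → Spec_check_amicable_numbers num1 num2 (check_amicable_numbers num1 num2)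

-- ===== LEMMAS AND PROOFS =====

-- reference value: sum of proper divisors, as a Finset sum
def pvSigma (n : Nat) : Nat := ∑ d ∈ Finset.filter (· ∣ n) (Finset.Ico 1 n), d

-- list/Finset bridge for A's loop
lemma list_range_map_sum (m : Nat) (f : Nat → Int) :
    ((List.range m).map f).sum = ∑ k ∈ Finset.range m, f k := by
  induction m with
  | zero => simp
  | succ m ih => simp [List.range_succ, Finset.sum_range_succ, ih]

lemma foldl_if_add (l : List Int) (p : Int → Prop) [DecidablePred p] (init : Int) :
    l.foldl (fun s d => if p d then s + d else s) init
      = init + (l.map (fun d => if p d then d else 0)).sum := by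
  induction l generalizing init with
  | nil => simp
  | cons x xs ih =>
    simp only [List.foldl_cons, List.map_cons, List.sum_cons, ih]
    by_cases hp : p x
    · simp [hp]; ring
    · simp [hp]

lemma pvSumA_eq_sigma (n : Nat) (hn : 0 < n) : pvSumA (n : Int) = (pvSigma n : Int) := by
  have hcast : ((n : Int) - 1).toNat = n - 1 := by omega
  rw [pvSumA, PySem.List.pyRange_one, hcast, foldl_if_add, List.map_map, list_range_map_sum, zero_add]
  have hrhs : pvSigma n = ∑ k ∈ Finset.range (n - 1), (if (1 + k) ∣ n then 1 + k else 0) := by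
    rw [pvSigma, Finset.sum_filter, Finset.sum_Ico_eq_sum_range]
  rw [hrhs, Nat.cast_sum]
  refine Finset.sum_congr rfl (fun k _ => ?_)
  have hk : (1 : Int) + (k : Int) = ((1 + k : Nat) : Int) := by push_cast; ring
  simp only [Function.comp_apply]
  rw [hk, PySem.Int.mod_natCast]
  by_cases hd : (1 + k) ∣ n
  · rw [if_pos (by exact_mod_cast congrArg (Nat.cast (R := Int)) (Nat.dvd_iff_mod_eq_zero.mp hd)),
      if_pos hd]
  · rw [if_neg (by
      intro hc
      exact hd (Nat.dvd_iff_mod_eq_zero.mpr (by exact_mod_cast hc))), if_neg hd, Nat.cast_zero]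

lemma pvLoopB_eq (n : Nat) (k : Nat) :
    pvLoopB n k = ∑ d ∈ Finset.Ico k (Nat.sqrt n + 1),
      (if d ∣ n then d + (if n / d ≠ d then n / d else 0) else 0) := by
  fun_induction pvLoopB n k with
  | case1 d h ih =>
    have hd : d ≤ Nat.sqrt n := Nat.le_sqrt.mpr h
    rw [Finset.sum_eq_sum_Ico_succ_bot (by omega), ih]
    congr 1
    by_cases hdvd : d ∣ n
    · rw [if_pos (Nat.dvd_iff_mod_eq_zero.mp hdvd), if_pos hdvd]
    · rw [if_neg (fun hc => hdvd (Nat.dvd_iff_mod_eq_zero.mpr hc)), if_neg hdvd]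
  | case2 d h =>
    have hd : Nat.sqrt n < d := by
      by_contra hc
      exact h (Nat.le_sqrt.mp (by omega))
    rw [Finset.Ico_eq_empty (by omega), Finset.sum_empty]

-- the sqrt pairing: divisors in [2, √n] together with their cofactors cover all divisors in [2, n)
lemma pairing (n : Nat) (hn : 2 ≤ n) :
    ∑ d ∈ Finset.Ico 2 (Nat.sqrt n + 1),
      (if d ∣ n then d + (if n / d ≠ d then n / d else 0) else 0)
      = ∑ d ∈ Finset.filter (· ∣ n) (Finset.Ico 2 n), d := by
  have hn0 : n ≠ 0 := by omega
  have hr1 : 1 ≤ Nat.sqrt n := Nat.sqrt_pos.mpr (by omega)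
  have hrn : Nat.sqrt n < n := Nat.sqrt_lt_self hn
  have hrr : Nat.sqrt n * Nat.sqrt n ≤ n := by
    have h := Nat.sqrt_le' n
    rw [pow_two] at h
    exact h
  have hlt : n < (Nat.sqrt n + 1) * (Nat.sqrt n + 1) := by
    have h := Nat.lt_succ_sqrt' n
    rw [Nat.succ_eq_add_one, pow_two] at h
    exact h
  rw [← Finset.sum_filter, Finset.sum_add_distrib,
    ← Finset.sum_filter (fun d => n / d ≠ d) (fun d => n / d),
    ← Finset.sum_filter_add_sum_filter_not
      (Finset.filter (· ∣ n) (Finset.Ico 2 n)) (fun d => d ≤ Nat.sqrt n)]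
  congr 1
  · -- direct part: divisors in [2, √n]
    apply Finset.sum_congr _ (fun _ _ => rfl)
    ext d
    simp only [Finset.mem_filter, Finset.mem_Ico]
    constructor
    · rintro ⟨⟨h2, h3⟩, h4⟩
      exact ⟨⟨⟨h2, by omega⟩, h4⟩, by omega⟩
    · rintro ⟨⟨⟨h2, h3⟩, h4⟩, h5⟩
      exact ⟨⟨h2, by omega⟩, h4⟩
  · -- paired part: d ↦ n / d sends divisors d ≤ √n (with cofactor ≠ d) to divisors > √n
    refine Finset.sum_nbij' (fun d => n / d) (fun e => n / e) ?_ ?_ ?_ ?_ ?_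
    · intro a ha
      simp only [Finset.mem_filter, Finset.mem_Ico] at ha ⊢
      obtain ⟨⟨⟨h2, h3⟩, hdvd⟩, hne⟩ := ha
      have har : a ≤ Nat.sqrt n := by omega
      have hmul : n / a * a = n := Nat.div_mul_cancel hdvd
      have hpos : 0 < n / a := Nat.div_pos (Nat.le_of_dvd (by omega) hdvd) (by omega)
      have hgt : Nat.sqrt n < n / a := by
        by_contra hq
        rw [not_lt] at hq
        rcases lt_trichotomy (n / a) a with h | h | h
        · nlinarith
        · exact hne h
        · nlinarith
      have hlt_n : n / a < n := by
        calc n / a ≤ n / 2 := Nat.div_le_div_left h2 (by omega)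
          _ < n := Nat.div_lt_self (by omega) (by omega)
      exact ⟨⟨⟨by omega, hlt_n⟩, Nat.div_dvd_of_dvd hdvd⟩, by omega⟩
    · intro e he
      simp only [Finset.mem_filter, Finset.mem_Ico] at he ⊢
      obtain ⟨⟨⟨h2, h3⟩, hdvd⟩, hgt⟩ := he
      rw [not_le] at hgt
      have hmul : n / e * e = n := Nat.div_mul_cancel hdvd
      have hpos : 0 < n / e := Nat.div_pos (Nat.le_of_dvd (by omega) hdvd) (by omega)
      have hd2 : 2 ≤ n / e := by
        by_contra hc
        have : n / e = 1 := by omega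
        rw [this] at hmul
        omega
      have hdr : n / e ≤ Nat.sqrt n := by
        by_contra hc
        rw [not_le] at hc
        nlinarith
      have hback : n / (n / e) = e := Nat.div_div_self hdvd hn0
      refine ⟨⟨⟨hd2, by omega⟩, Nat.div_dvd_of_dvd hdvd⟩, ?_⟩
      rw [hback]
      omega
    · intro a ha
      simp only [Finset.mem_filter, Finset.mem_Ico] at ha
      exact Nat.div_div_self ha.1.2 hn0
    · intro e he
      simp only [Finset.mem_filter, Finset.mem_Ico] at he
      exact Nat.div_div_self he.1.2 hn0
    · intro a _
      rfl

lemma pvSumB_eq_sigma (n : Nat) (hn : 0 < n) : pvSumB n = pvSigma n := by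
  by_cases h1 : n = 1
  · subst h1
    simp [pvSumB, pvSigma]
  · have hn2 : 2 ≤ n := by omega
    have hsplit : (∑ d ∈ Finset.filter (· ∣ n) (Finset.Ico 1 n), d)
        = 1 + ∑ d ∈ Finset.filter (· ∣ n) (Finset.Ico 2 n), d := by
      rw [Finset.sum_filter, Finset.sum_filter,
        Finset.sum_eq_sum_Ico_succ_bot (by omega : 1 < n), if_pos (one_dvd n)]
    rw [pvSumB, if_neg h1, pvLoopB_eq n 2, pairing n hn2, pvSigma, hsplit]

-- ===== VERDICT (by name: the statement is the Claim_ definition above) =====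
theorem check_amicable_numbers_spec : Claim_equal_check_amicable_numbers := by
  intro num1 num2 _
  unfold Spec_check_amicable_numbers check_amicable_numbers check_amicable_numbers_alt
  by_cases h : num1 > 0 ∧ num2 > 0
  · obtain ⟨h1, h2⟩ := h
    rw [if_pos ⟨h1, h2⟩, if_neg (by omega)]
    have e1 : pvSumA num1 = (pvSumB num1.toNat : Int) := by
      have := pvSumA_eq_sigma num1.toNat (by omega)
      rw [pvSumB_eq_sigma num1.toNat (by omega)]
      rwa [Int.toNat_of_nonneg (by omega)] at this
    have e2 : pvSumA num2 = (pvSumB num2.toNat : Int) := by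
      have := pvSumA_eq_sigma num2.toNat (by omega)
      rw [pvSumB_eq_sigma num2.toNat (by omega)]
      rwa [Int.toNat_of_nonneg (by omega)] at this
    simp only [e1, e2]
  · rw [if_neg h, if_pos (by omega)]
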